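-- pv_equiv track=rewrite | github.com/arwhirang/vis | SigSubstructureShared.py | sigIdxAtom
-- ===== SOURCE A (Python) =====
-- def sigIdxAtom(sigIdx, currSmiList):
--     sigIdx_general, sigIdx_atom = [], []
--     twoChars = {"Al": 1, "Au": 1, "Ag": 1, "As": 1, "Ba": 1, "Be": 1, "Bi": 1, "Br": 1, "Ca": 1, "Cd": 1, "Cl": 1,
--                 "Co": 1, "Cr": 1, "Cu": 1, "Dy": 1, "Fe": 1, "Gd": 1, "Ge": 1, "In": 1, "Li": 1, "Mg": 1, "Mn": 1,
--                 "Mo": 1, "Na": 1, "Ni": 1, "Nd": 1, "Pb": 1, "Pt": 1, "Pd": 1, "Ru": 1, "Sb": 1, "Se": 1, "se": 1,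
--                 "Si": 1, "Sn": 1, "Sr": 1, "Ti": 1, "Tl": 1, "Yb": 1, "Zn": 1, "Zr": 1}
--     atomcnt = -1#first atom is 0
--     for idx, ele in enumerate(currSmiList):
--         if ele in twoChars or ele.isalpha():# or ele.isdigit():
--             if ele == "@" or ele == "H":#these are the same as the bond signals
--                 continue
--             atomcnt += 1
--             if idx in sigIdx:
--                 sigIdx_general.append(idx)
--                 sigIdx_atom.append(atomcnt)
--     return sigIdx_general, sigIdx_atom
-- ===== SOURCE B (Python) =====
-- def sigIdxAtom(sigIdx, currSmiList):
--     twoChars = {"Al": 1, "Au": 1, "Ag": 1, "As": 1, "Ba": 1, "Be": 1, "Bi": 1, "Br": 1, "Ca": 1, "Cd": 1, "Cl": 1,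
--                 "Co": 1, "Cr": 1, "Cu": 1, "Dy": 1, "Fe": 1, "Gd": 1, "Ge": 1, "In": 1, "Li": 1, "Mg": 1, "Mn": 1,
--                 "Mo": 1, "Na": 1, "Ni": 1, "Nd": 1, "Pb": 1, "Pt": 1, "Pd": 1, "Ru": 1, "Sb": 1, "Se": 1, "se": 1,
--                 "Si": 1, "Sn": 1, "Sr": 1, "Ti": 1, "Tl": 1, "Yb": 1, "Zn": 1, "Zr": 1}
--     # pass 1: map every qualifying token position to its atom count
--     pos2atom = {}
--     atomcnt = -1  # first atom is 0
--     for idx, ele in enumerate(currSmiList):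
--         if (ele in twoChars or ele.isalpha()) and ele != "@" and ele != "H":
--             atomcnt += 1
--             pos2atom[idx] = atomcnt
--     # pass 2: drive the output from the flagged indices via table lookup
--     sigIdx_general, sigIdx_atom = [], []
--     for idx in sorted(set(sigIdx)):
--         if idx in pos2atom:
--             sigIdx_general.append(idx)
--             sigIdx_atom.append(pos2atom[idx])
--     return sigIdx_general, sigIdx_atom
-- ===== Notes on version B (the rewrite author's own statement) =====
-- stated objective: faster
-- what changed: Replaces A's single combined scan (atom counter plus an 'idx in sigIdx' list-membership test inside the token loop) by two passes: pass one builds a position-to-atom-count dict over the tokens with no sigIdx test, pass two iterates sorted(set(sigIdx)) and emits matches by dict lookup.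
import Mathlib
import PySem

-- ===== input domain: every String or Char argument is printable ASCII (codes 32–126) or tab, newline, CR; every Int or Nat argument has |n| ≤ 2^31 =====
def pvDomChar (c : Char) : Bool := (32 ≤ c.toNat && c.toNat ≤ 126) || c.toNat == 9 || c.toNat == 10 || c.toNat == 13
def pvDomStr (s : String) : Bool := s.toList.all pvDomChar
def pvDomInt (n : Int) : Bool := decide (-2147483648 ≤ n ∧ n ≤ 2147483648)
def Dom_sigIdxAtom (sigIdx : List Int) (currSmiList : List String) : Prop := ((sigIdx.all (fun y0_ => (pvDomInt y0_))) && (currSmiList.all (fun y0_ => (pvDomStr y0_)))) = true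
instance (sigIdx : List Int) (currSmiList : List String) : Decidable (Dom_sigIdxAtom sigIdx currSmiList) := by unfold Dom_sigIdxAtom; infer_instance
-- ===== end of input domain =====

-- B replaces A's single combined scan by two passes — a position→atom-count table built once,
-- then output driven from sorted(set(sigIdx)) by table lookup, removing the per-atom list-membership scan (objective: faster).

-- shared constant: the twoChars dict literal appearing in both Pythons
def pvTwoChars : PySem.Dict String Int := PySem.Dict.ofList
  [("Al",1),("Au",1),("Ag",1),("As",1),("Ba",1),("Be",1),("Bi",1),("Br",1),("Ca",1),("Cd",1),("Cl",1),
   ("Co",1),("Cr",1),("Cu",1),("Dy",1),("Fe",1),("Gd",1),("Ge",1),("In",1),("Li",1),("Mg",1),("Mn",1),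
   ("Mo",1),("Na",1),("Ni",1),("Nd",1),("Pb",1),("Pt",1),("Pd",1),("Ru",1),("Sb",1),("Se",1),("se",1),
   ("Si",1),("Sn",1),("Sr",1),("Ti",1),("Tl",1),("Yb",1),("Zn",1),("Zr",1)]

-- ===== PORT A =====
def sigIdxAtom (sigIdx : List Int) (currSmiList : List String) : List Int × List Int :=
  let st := (PySem.List.enumerate currSmiList 0).foldl (fun st p =>
    if pvTwoChars.contains p.2 || PySem.Str.strIsalpha p.2 then
      if p.2 == "@" || p.2 == "H" then st
      else
        if sigIdx.contains p.1 then (st.1 + 1, st.2.1 ++ [p.1], st.2.2 ++ [st.1 + 1])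
        else (st.1 + 1, st.2.1, st.2.2)
    else st) ((-1 : Int), ([] : List Int), ([] : List Int))
  (st.2.1, st.2.2)

-- ===== PORT B =====
def sigIdxAtom_alt (sigIdx : List Int) (currSmiList : List String) : List Int × List Int :=
  -- pass 1: position → atom count table
  let p1 := (PySem.List.enumerate currSmiList 0).foldl (fun st p =>
    if (pvTwoChars.contains p.2 || PySem.Str.strIsalpha p.2) && !(p.2 == "@") && !(p.2 == "H") then
      (st.1 + 1, st.2.insert p.1 (st.1 + 1))
    else st) ((-1 : Int), (PySem.Dict.empty : PySem.Dict Int Int))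
  -- pass 2: iterate sorted(set(sigIdx)), look up the table
  let st := (PySem.List.sorted (PySem.Set.ofList sigIdx) (fun x => x) false).foldl
    (fun st t => if p1.2.contains t then (st.1 ++ [t], st.2 ++ [p1.2.getD t 0]) else st)
    (([] : List Int), ([] : List Int))
  (st.1, st.2)

-- ===== PRECONDITION & SPEC =====
def Spec_sigIdxAtom (sigIdx : List Int) (currSmiList : List String) (out : List Int × List Int) : Prop := out = sigIdxAtom_alt sigIdx currSmiList
instance (sigIdx : List Int) (currSmiList : List String) (out : List Int × List Int) : Decidable (Spec_sigIdxAtom sigIdx currSmiList out) := by unfold Spec_sigIdxAtom; infer_instance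

-- ===== CLAIM (what is proved, stated in full; the proofs are below) =====
def Claim_equal_sigIdxAtom : Prop := ∀ (sigIdx : List Int) (currSmiList : List String), Dom_sigIdxAtom sigIdx currSmiList → Spec_sigIdxAtom sigIdx currSmiList (sigIdxAtom sigIdx currSmiList)

-- ===== LEMMAS AND PROOFS =====

-- a token counts as an atom
def pvKeep (e : String) : Bool :=
  (pvTwoChars.contains e || PySem.Str.strIsalpha e) && !(e == "@" || e == "H")

-- the (position, atom count) pairs produced by a scan starting at count c
def pvPairs : List (Int × String) → Int → List (Int × Int)
  | [], _ => []
  | p :: rest, c => if pvKeep p.2 then (p.1, c + 1) :: pvPairs rest (c + 1) else pvPairs rest c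

lemma pvPairs_fst_sublist (L : List (Int × String)) (c : Int) :
    ((pvPairs L c).map Prod.fst).Sublist (L.map Prod.fst) := by
  induction L generalizing c with
  | nil => simp [pvPairs]
  | cons p rest ih =>
    simp only [pvPairs, List.map_cons]
    split
    · exact List.Sublist.cons₂ _ (ih _)
    · exact List.Sublist.cons _ (ih _)

lemma pvPairs_pairwise (l : List String) :
    (pvPairs (PySem.List.enumerate l 0) (-1)).Pairwise (fun p q => p.1 < q.1) := by
  have h1 : ((PySem.List.enumerate l 0).map Prod.fst).Pairwise (· < ·) := by
    have := PySem.List.pairwise_lt_enumerate (xs := l) (s := 0)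
    exact (List.pairwise_map).mpr this
  have h2 := List.Pairwise.sublist (pvPairs_fst_sublist (PySem.List.enumerate l 0) (-1)) h1
  exact (List.pairwise_map).mp h2

-- A's loop computes the filtered pair list
lemma foldlA (sigIdx : List Int) (L : List (Int × String)) (c : Int) (g a : List Int) :
    (L.foldl (fun st p =>
      if pvTwoChars.contains p.2 || PySem.Str.strIsalpha p.2 then
        if p.2 == "@" || p.2 == "H" then st
        else
          if sigIdx.contains p.1 then (st.1 + 1, st.2.1 ++ [p.1], st.2.2 ++ [st.1 + 1])
          else (st.1 + 1, st.2.1, st.2.2)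
      else st) (c, g, a)).2 =
    (g ++ ((pvPairs L c).filter (fun p => sigIdx.contains p.1)).map Prod.fst,
     a ++ ((pvPairs L c).filter (fun p => sigIdx.contains p.1)).map Prod.snd) := by
  induction L generalizing c g a with
  | nil => simp [pvPairs]
  | cons p rest ih =>
    rw [List.foldl_cons]
    by_cases h1 : (pvTwoChars.contains p.2 || PySem.Str.strIsalpha p.2) = true
    · by_cases h2 : (p.2 == "@" || p.2 == "H") = true
      · have hk : pvKeep p.2 = false := by simp only [pvKeep, h2]; simp
        rw [if_pos h1, if_pos h2, ih]
        simp [pvPairs, hk]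
      · have hk : pvKeep p.2 = true := by simp only [pvKeep, h1, h2]; simp
        by_cases h3 : sigIdx.contains p.1 = true
        · have h3' : p.1 ∈ sigIdx := by simpa using h3
          rw [if_pos h1, if_neg h2, if_pos h3, ih]
          simp [pvPairs, hk, h3']
        · have h3' : p.1 ∉ sigIdx := by simpa using h3
          rw [if_pos h1, if_neg h2, if_neg h3, ih]
          simp [pvPairs, hk, h3']
    · have hk : pvKeep p.2 = false := by simp only [pvKeep, h1]; simp
      rw [if_neg h1, ih]
      simp [pvPairs, hk]

-- B's first loop builds the table with items = pvPairs
lemma foldlB1 (L : List (Int × String)) (c : Int) (d : PySem.Dict Int Int)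
    (hfresh : ∀ p ∈ L, d.contains p.1 = false) (hnd : (L.map Prod.fst).Nodup) :
    ((L.foldl (fun st p =>
      if (pvTwoChars.contains p.2 || PySem.Str.strIsalpha p.2) && !(p.2 == "@") && !(p.2 == "H") then
        (st.1 + 1, st.2.insert p.1 (st.1 + 1))
      else st) (c, d)).2).items = d.items ++ pvPairs L c := by
  induction L generalizing c d with
  | nil => simp [pvPairs]
  | cons p rest ih =>
    rw [List.foldl_cons]
    have hg : ((pvTwoChars.contains p.2 || PySem.Str.strIsalpha p.2) && !(p.2 == "@") && !(p.2 == "H")) = pvKeep p.2 := by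
      simp [pvKeep, Bool.not_or, Bool.and_assoc]
    rw [List.map_cons, List.nodup_cons] at hnd
    by_cases hk : pvKeep p.2 = true
    · have hfp : d.contains p.1 = false := hfresh p (List.mem_cons_self)
      have hrest : ∀ q ∈ rest, (d.insert p.1 (c + 1)).contains q.1 = false := by
        intro q hq
        rw [PySem.Dict.contains_insert d p.1 q.1 (c + 1)]
        have hne : q.1 ≠ p.1 := fun he => hnd.1 (he ▸ List.mem_map_of_mem hq)
        simp [hne, hfresh q (List.mem_cons_of_mem _ hq)]
      rw [if_pos (by rw [hg]; exact hk), ih (c + 1) _ hrest hnd.2,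
          PySem.Dict.items_insert_of_not_contains _ _ hfp]
      simp [pvPairs, hk]
    · rw [if_neg (by rw [hg]; exact hk), ih c d (fun q hq => hfresh q (List.mem_cons_of_mem _ hq)) hnd.2]
      simp [pvPairs, hk]

-- B's second loop collects the lookups
lemma foldlB2 (d : PySem.Dict Int Int) (ts : List Int) (g a : List Int) :
    ts.foldl (fun st t => if d.contains t then (st.1 ++ [t], st.2 ++ [d.getD t 0]) else st) (g, a) =
    (g ++ (ts.filterMap (fun t => (d.get? t).map (fun v => (t, v)))).map Prod.fst,
     a ++ (ts.filterMap (fun t => (d.get? t).map (fun v => (t, v)))).map Prod.snd) := by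
  induction ts generalizing g a with
  | nil => simp
  | cons t rest ih =>
    simp only [List.foldl_cons, List.filterMap_cons]
    rcases hget : d.get? t with _ | v
    · have hc : d.contains t = false := by
        rw [PySem.Dict.contains_eq_isSome_get?, hget]; rfl
      simp [hc, ih]
    · have hc : d.contains t = true := by
        rw [PySem.Dict.contains_eq_isSome_get?, hget]; rfl
      have hgd : d.getD t 0 = v := PySem.Dict.getD_of_get?_eq_some _ _ hget
      simp [hc, hgd, ih]

-- the central identity: lookup over sorted(set(sigIdx)) = filter of the pair list
lemma central (sigIdx : List Int) (d : PySem.Dict Int Int) (P : List (Int × Int))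
    (hitems : d.items = P) (hpw : P.Pairwise (fun p q => p.1 < q.1)) :
    (PySem.List.sorted (PySem.Set.ofList sigIdx) (fun x => x) false).filterMap
      (fun t => (d.get? t).map (fun v => (t, v))) =
    P.filter (fun p => sigIdx.contains p.1) := by
  have hkeys : d.keys = P.map (fun p => p.1) := by
    simp only [PySem.Dict.keys, hitems]
  have hnd_keys : d.keys.Nodup := by
    rw [hkeys]
    exact ((List.pairwise_map).mpr hpw).imp (fun h => ne_of_lt h)
  have hget : ∀ t v, d.get? t = some v ↔ (t, v) ∈ P := fun t v => by
    rw [PySem.Dict.get?_eq_some_iff_mem_items d t v hnd_keys, hitems]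
  have hpw_ts : (PySem.List.sorted (PySem.Set.ofList sigIdx) (fun x => x) false).Pairwise (· < ·) :=
    PySem.List.sorted_ofList_pairwise_lt sigIdx
  have hS_pw : ((PySem.List.sorted (PySem.Set.ofList sigIdx) (fun x => x) false).filterMap
      (fun t => (d.get? t).map (fun v => (t, v)))).Pairwise (fun p q => p.1 < q.1) := by
    rw [List.pairwise_filterMap]
    refine List.Pairwise.imp ?_ hpw_ts
    intro a b h c hc c' hc'
    simp only [Option.map_eq_some_iff] at hc hc'
    obtain ⟨v, _, rfl⟩ := hc
    obtain ⟨v', _, rfl⟩ := hc'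
    exact h
  have hF_pw : (P.filter (fun p => sigIdx.contains p.1)).Pairwise (fun p q => p.1 < q.1) :=
    List.Pairwise.sublist List.filter_sublist hpw
  have hS_nd := hS_pw.imp (fun h heq => ne_of_lt h (congrArg Prod.fst heq))
  have hF_nd := hF_pw.imp (fun h heq => ne_of_lt h (congrArg Prod.fst heq))
  have hperm : ((PySem.List.sorted (PySem.Set.ofList sigIdx) (fun x => x) false).filterMap
      (fun t => (d.get? t).map (fun v => (t, v)))).Perm (P.filter (fun p => sigIdx.contains p.1)) := by
    rw [List.perm_ext_iff_of_nodup hS_nd hF_nd]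
    intro q
    simp only [List.mem_filterMap, Option.map_eq_some_iff, List.mem_filter,
      PySem.List.mem_sorted, PySem.Set.mem_ofList]
    constructor
    · rintro ⟨t, hts, v, hv, rfl⟩
      exact ⟨(hget t v).mp hv, by simpa using hts⟩
    · rintro ⟨hq, hmem⟩
      exact ⟨q.1, by simpa using hmem, q.2, (hget q.1 q.2).mpr hq, rfl⟩
  exact List.Perm.eq_of_pairwise (fun a b _ _ h1 h2 => absurd h2 (lt_asymm h1)) hS_pw hF_pw hperm

-- ===== VERDICT (by name: the statement is the Claim_ definition above) =====
theorem sigIdxAtom_spec : Claim_equal_sigIdxAtom := by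
  intro sigIdx l _
  unfold Spec_sigIdxAtom
  have hnd : ((PySem.List.enumerate l 0).map Prod.fst).Nodup := by
    have h : (List.map (fun x => x.1) (PySem.List.enumerate l 0)).Nodup := by
      rw [PySem.List.map_fst_enumerate]
      exact PySem.List.nodup_pyRange_one _ _
    exact h
  have hfresh : ∀ p ∈ PySem.List.enumerate l 0,
      (PySem.Dict.empty : PySem.Dict Int Int).contains p.1 = false :=
    fun p _ => PySem.Dict.contains_empty _
  have hB1 := foldlB1 (PySem.List.enumerate l 0) (-1) PySem.Dict.empty hfresh hnd
  rw [show (PySem.Dict.empty : PySem.Dict Int Int).items = [] from rfl, List.nil_append] at hB1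
  have hC := central sigIdx _ _ hB1 (pvPairs_pairwise l)
  simp only [sigIdxAtom, sigIdxAtom_alt, foldlA, foldlB2, hC]
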